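-- pv_equiv track=rewrite | github.com/whdljoy/Algorithm | Etc/Python/acmicpc/greedy/1343.py | solution
-- ===== SOURCE A (Python) =====
-- def solution(answer):
--   check = 0
--   re = []
--   for item in answer:
--     if item == "X":
--       check+=1
--     else:
--       if check % 2==0:
--         if check %4 == 0:
--           for i in range(check//4):
--             re.append("AAAA")
--         else:
--           for _ in range(check//4):
--             re.append("AAAA")
--           for _ in range((check%4)//2):
--             re.append("BB")
--       else:
--         re=[]
--         re.append("-1")
--         return re
--       check = 0
--       re.append(".")
--
--   if check !=0:
--     if check % 2==0:
--       if check %4 == 0: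
--         for i in range(check//4):
--           re.append("AAAA")
--       else:
--         for _ in range(check//4):
--           re.append("AAAA")
--         for _ in range((check%4)//2):
--           re.append("BB")
--     else:
--         re=[]
--         re.append("-1")
--         return re
--   return re
-- ===== SOURCE B (Python) =====
-- def solution(answer):
--     # Split into maximal X-runs (every non-X char acts as a separator) and tile each run.
--     normalized = ''.join(c if c == 'X' else '.' for c in answer)
--     segs = normalized.split('.')
--     last = len(segs) - 1
--     out = []
--     i = 0
--     for seg in segs:
--         n = len(seg)
--         if n % 2 == 1:
--             return ['-1']
--         out += ['AAAA'] * (n // 4) + ['BB'] * ((n % 4) // 2)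
--         if i < last:
--             out.append('.')
--         i += 1
--     return out
-- ===== Notes on version B (the rewrite author's own statement) =====
-- stated objective: simpler
-- what changed: A scans the string character by character maintaining a running X-counter with duplicated tiling code at separators and at the end; B normalizes every non-X character to '.', splits into the X-runs once, and tiles each run with replicated ['AAAA']/['BB'] lists in one short recursion.
import Mathlib
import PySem

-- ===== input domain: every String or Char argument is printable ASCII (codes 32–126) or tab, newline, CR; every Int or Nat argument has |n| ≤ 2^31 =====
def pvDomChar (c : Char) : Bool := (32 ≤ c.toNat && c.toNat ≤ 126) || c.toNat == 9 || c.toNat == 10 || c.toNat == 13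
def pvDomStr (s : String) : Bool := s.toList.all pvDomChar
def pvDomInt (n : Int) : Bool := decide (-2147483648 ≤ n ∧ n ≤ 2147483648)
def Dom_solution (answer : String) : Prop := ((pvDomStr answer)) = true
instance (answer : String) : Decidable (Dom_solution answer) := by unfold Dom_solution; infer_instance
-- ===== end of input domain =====

-- B replaces A's single char-scan with a running counter by split-into-X-runs
-- (every non-X char is a separator) plus a recursion tiling each run; objective: simpler.


-- ===== PORT A =====
-- A's duplicated "append AAAA's then BB's" block (it appears verbatim twice in the Python)
def aChunk (check : Int) : List String :=
  if PySem.Int.mod check 4 = 0 then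
    List.replicate (PySem.Int.floordiv check 4).toNat "AAAA"
  else
    List.replicate (PySem.Int.floordiv check 4).toNat "AAAA"
      ++ List.replicate (PySem.Int.floordiv (PySem.Int.mod check 4) 2).toNat "BB"

-- the for-loop over answer with state (check, re) and the early return on an odd run
def aLoop : List Char → Int → List String → List String
  | [], check, re =>
      if check ≠ 0 then
        if PySem.Int.mod check 2 = 0 then re ++ aChunk check else ["-1"]
      else re
  | c :: rest, check, re =>
      if c = 'X' then aLoop rest (check + 1) re
      else if PySem.Int.mod check 2 = 0 then aLoop rest 0 (re ++ aChunk check ++ ["."])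
      else ["-1"]

def solution (answer : String) : List String := aLoop answer.toList 0 []

-- ===== PORT B =====
-- ['AAAA'] * (n // 4) + ['BB'] * ((n % 4) // 2)
def bPiece (n : Nat) : List String :=
  List.replicate (n / 4) "AAAA" ++ List.replicate ((n % 4) / 2) "BB"

-- the for-loop over segs with index i, early return ['-1'] on an odd run
def bLoop (last : Nat) : List (List Char) → Nat → List String → List String
  | [], _, out => out
  | seg :: rest, i, out =>
      if seg.length % 2 = 1 then ["-1"]
      else bLoop last rest (i + 1)
        (out ++ bPiece seg.length ++ (if i < last then ["."] else []))

def solution_alt (answer : String) : List String :=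
  let normalized := answer.toList.map (fun c => if c = 'X' then c else '.')
  let segs := PySem.Chars.splitOn normalized ['.']   -- normalized.split('.')
  bLoop (segs.length - 1) segs 0 []

-- ===== PRECONDITION & SPEC =====
def Spec_solution (answer : String) (out : List String) : Prop := out = solution_alt answer
instance (answer : String) (out : List String) : Decidable (Spec_solution answer out) := by unfold Spec_solution; infer_instance

-- ===== CLAIM (what is proved, stated in full; the proofs are below) =====
def Claim_equal_solution : Prop := ∀ (answer : String), Dom_solution answer → Spec_solution answer (solution answer)

-- ===== LEMMAS AND PROOFS =====

-- proof-side recursion over the segments (bLoop without the accumulator and index)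
def bGo : List (List Char) → Option (List String)
  | [] => some []
  | seg :: rest =>
      if seg.length % 2 = 1 then none
      else match rest with
        | [] => some (bPiece seg.length)
        | _ :: _ => (bGo rest).map (fun tail => bPiece seg.length ++ "." :: tail)

lemma bGo_cons_cons (seg s : List Char) (ss : List (List Char)) :
    bGo (seg :: s :: ss) =
      if seg.length % 2 = 1 then none
      else (bGo (s :: ss)).map (fun tail => bPiece seg.length ++ "." :: tail) := rfl

lemma bLoop_eq_bGo : ∀ (segs : List (List Char)) (last i : Nat) (out : List String),
    i + segs.length = last + 1 →
    bLoop last segs i out =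
      match bGo segs with
      | some t => out ++ t
      | none => ["-1"] := by
  intro segs
  induction segs with
  | nil => intro last i out _; simp [bLoop, bGo]
  | cons seg rest ih =>
      intro last i out h
      by_cases hodd : seg.length % 2 = 1
      · simp [bLoop, bGo, hodd]
      · rw [show bLoop last (seg :: rest) i out
              = bLoop last rest (i + 1) (out ++ bPiece seg.length ++ (if i < last then ["."] else []))
            from by simp [bLoop, hodd]]
        cases rest with
        | nil =>
            have hi : i = last := by simpa using h
            simp [bLoop, bGo, hodd, hi]
        | cons s ss =>
            rw [ih last (i + 1) _ (by simp at h ⊢; omega)]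
            have hlt : i < last := by simp at h; omega
            rw [bGo_cons_cons, if_neg hodd]
            cases hbg : bGo (s :: ss) <;> simp [hlt]

-- clean recursive characterisation of normalized.split('.') for the single-char separator
def splitDot : List Char → List (List Char)
  | [] => [[]]
  | c :: rest =>
      if c = '.' then [] :: splitDot rest
      else (c :: (splitDot rest).headI) :: (splitDot rest).tail

lemma splitDot_ne_nil (l : List Char) : splitDot l ≠ [] := by
  cases l with
  | nil => simp [splitDot]
  | cons c rest => simp only [splitDot]; split <;> simp

lemma splitOn_go_eq (fuel : Nat) :
    ∀ (l cur : List Char) (acc : List (List Char)), l.length ≤ fuel →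
      PySem.Chars.splitOn.go ['.'] fuel l cur acc =
        acc.reverse ++ (cur.reverse ++ (splitDot l).headI) :: (splitDot l).tail := by
  induction fuel with
  | zero =>
      intro l cur acc h
      have : l = [] := List.length_eq_zero_iff.mp (Nat.le_zero.mp h)
      subst this
      simp [PySem.Chars.splitOn.go, splitDot]
  | succ fuel ih =>
      intro l cur acc h
      cases l with
      | nil => simp [PySem.Chars.splitOn.go, splitDot]
      | cons c rest =>
          rw [PySem.Chars.splitOn.go]
          by_cases hc : c = '.'
          · subst hc
            have hpre : List.isPrefixOf ['.'] ('.' :: rest) = true := by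
              simp [List.isPrefixOf]
            simp only [hpre, if_pos]
            have hdrop : List.drop ['.'].length ('.' :: rest) = rest := rfl
            rw [hdrop, ih rest [] (cur.reverse :: acc) (by simpa using Nat.le_of_succ_le_succ h)]
            have hsd : splitDot ('.' :: rest) = [] :: splitDot rest := by simp [splitDot]
            rw [hsd]
            obtain ⟨s, ss, hss⟩ := List.exists_cons_of_ne_nil (splitDot_ne_nil rest)
            rw [hss]
            simp only [List.reverse_cons, List.reverse_nil, List.headI, List.tail_cons,
              List.nil_append, List.append_assoc, List.singleton_append, List.append_nil]
          · have hpre : List.isPrefixOf ['.'] (c :: rest) = false := by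
              simp [List.isPrefixOf]
              exact fun h => hc h.symm
            simp only [hpre]
            rw [if_neg (by simp)]
            rw [ih rest (c :: cur) acc (by simpa using Nat.le_of_succ_le_succ h)]
            have hsd : splitDot (c :: rest) = (c :: (splitDot rest).headI) :: (splitDot rest).tail := by
              simp [splitDot, hc]
            rw [hsd]
            simp

lemma splitOn_eq_splitDot (l : List Char) :
    PySem.Chars.splitOn l ['.'] = splitDot l := by
  have := splitOn_go_eq (l.length + 1) l [] [] (Nat.le_succ _)
  rw [PySem.Chars.splitOn] at *
  rw [this]
  obtain ⟨s, ss, hss⟩ := List.exists_cons_of_ne_nil (splitDot_ne_nil l)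
  simp [hss]

-- prepend a run of n X's to the first segment
def consFirst (n : Nat) : List (List Char) → List (List Char)
  | [] => [List.replicate n 'X']
  | s :: ss => (List.replicate n 'X' ++ s) :: ss

lemma aChunk_eq_bPiece (n : Nat) :
    aChunk (n : Int) = bPiece n := by
  have h4 : PySem.Int.mod (n : Int) 4 = ((n % 4 : Nat) : Int) := by
    exact_mod_cast PySem.Int.mod_natCast n 4
  have hd : PySem.Int.floordiv (n : Int) 4 = ((n / 4 : Nat) : Int) := by
    exact_mod_cast PySem.Int.floordiv_natCast n 4
  have hm2 : PySem.Int.floordiv ((n % 4 : Nat) : Int) 2 = ((n % 4 / 2 : Nat) : Int) := by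
    exact_mod_cast PySem.Int.floordiv_natCast (n % 4) 2
  simp only [aChunk, bPiece, h4, hd, hm2, Int.toNat_natCast]
  by_cases hm : n % 4 = 0
  · simp [hm]
  · rw [if_neg (by exact_mod_cast hm)]

lemma mod2_cast (n : Nat) : PySem.Int.mod (n : Int) 2 = ((n % 2 : Nat) : Int) := by
  exact_mod_cast PySem.Int.mod_natCast n 2

lemma aLoop_eq (l : List Char) :
    ∀ (n : Nat) (re : List String),
      aLoop l (n : Int) re =
        match bGo (consFirst n (splitDot (l.map (fun c => if c = 'X' then c else '.')))) with
        | some out => re ++ out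
        | none => ["-1"] := by
  induction l with
  | nil =>
      intro n re
      simp only [aLoop, List.map_nil, splitDot, consFirst, List.append_nil]
      by_cases hn : (n : Int) = 0
      · have : n = 0 := by exact_mod_cast hn
        subst this
        simp [bGo, bPiece]
      · rw [if_pos hn]
        by_cases h2 : n % 2 = 0
        · rw [if_pos (by rw [mod2_cast]; exact_mod_cast h2)]
          simp only [bGo, List.length_replicate]
          rw [if_neg (by omega)]
          simp [aChunk_eq_bPiece n]
        · rw [if_neg (by rw [mod2_cast]; intro hcon; exact h2 (by exact_mod_cast hcon))]
          simp only [bGo, List.length_replicate]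
          rw [if_pos (by omega)]
  | cons c rest ih =>
      intro n re
      by_cases hc : c = 'X'
      · subst hc
        have hstep : aLoop ('X' :: rest) (n : Int) re = aLoop rest ((n : Int) + 1) re := by
          simp [aLoop]
        have hcast : ((n : Int) + 1) = ((n + 1 : Nat) : Int) := by push_cast; ring
        rw [hstep, hcast, ih (n + 1) re]
        have hmap : List.map (fun c => if c = 'X' then c else '.') ('X' :: rest)
            = 'X' :: List.map (fun c => if c = 'X' then c else '.') rest := by simp
        have harr : consFirst (n + 1) (splitDot (rest.map (fun c => if c = 'X' then c else '.')))
            = consFirst n (splitDot ('X' :: rest.map (fun c => if c = 'X' then c else '.'))) := by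
          obtain ⟨s, ss, hss⟩ := List.exists_cons_of_ne_nil
            (splitDot_ne_nil (rest.map (fun c => if c = 'X' then c else '.')))
          have hsd : splitDot ('X' :: rest.map (fun c => if c = 'X' then c else '.'))
              = ('X' :: ((splitDot (rest.map (fun c => if c = 'X' then c else '.'))).headI))
                :: (splitDot (rest.map (fun c => if c = 'X' then c else '.'))).tail := by
            simp [splitDot]
          rw [hsd, hss]
          simp [consFirst, List.replicate_succ']
        rw [harr, hmap]
      · obtain ⟨s, ss, hss⟩ := List.exists_cons_of_ne_nil
          (splitDot_ne_nil (rest.map (fun c => if c = 'X' then c else '.')))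
        have hmap : List.map (fun c => if c = 'X' then c else '.') (c :: rest)
            = '.' :: List.map (fun c => if c = 'X' then c else '.') rest := by simp [hc]
        have hsegs : consFirst n (splitDot ((c :: rest).map (fun c => if c = 'X' then c else '.')))
            = List.replicate n 'X' :: s :: ss := by
          rw [hmap]
          have hsd : splitDot ('.' :: rest.map (fun c => if c = 'X' then c else '.'))
              = [] :: splitDot (rest.map (fun c => if c = 'X' then c else '.')) := by
            simp [splitDot]
          rw [hsd, hss]
          simp [consFirst]
        rw [hsegs]
        by_cases h2 : n % 2 = 0
        · have hstep : aLoop (c :: rest) (n : Int) re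
              = aLoop rest 0 (re ++ aChunk (n : Int) ++ ["."]) := by
            simp only [aLoop, if_neg hc]
            rw [if_pos (by rw [mod2_cast]; exact_mod_cast h2)]
          rw [hstep, show (0 : Int) = ((0 : Nat) : Int) from rfl, ih 0 (re ++ aChunk (n : Int) ++ ["."])]
          have hcf : consFirst 0 (splitDot (rest.map (fun c => if c = 'X' then c else '.')))
              = s :: ss := by rw [hss]; simp [consFirst]
          rw [hcf]
          have hb : bGo (List.replicate n 'X' :: s :: ss)
              = (bGo (s :: ss)).map (fun tail => bPiece n ++ "." :: tail) := by
            rw [bGo_cons_cons, if_neg (by simp; omega)]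
            simp
          rw [hb]
          cases hbg : bGo (s :: ss) with
          | none => simp
          | some tail => simp [aChunk_eq_bPiece n]
        · have hstep : aLoop (c :: rest) (n : Int) re = ["-1"] := by
            simp only [aLoop, if_neg hc]
            rw [if_neg (by rw [mod2_cast]; intro hcon; exact h2 (by exact_mod_cast hcon))]
          rw [hstep]
          simp only [bGo, List.length_replicate]
          rw [if_pos (by omega)]

-- ===== VERDICT (by name: the statement is the Claim_ definition above) =====
theorem solution_spec : Claim_equal_solution := by
  intro answer _
  unfold Spec_solution solution solution_alt
  simp only [splitOn_eq_splitDot]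
  obtain ⟨s, ss, hss⟩ := List.exists_cons_of_ne_nil
    (splitDot_ne_nil (answer.toList.map (fun c => if c = 'X' then c else '.')))
  rw [hss, bLoop_eq_bGo (s :: ss) ((s :: ss).length - 1) 0 [] (by simp)]
  have h0 : (0 : Int) = ((0 : Nat) : Int) := rfl
  rw [h0, aLoop_eq, hss]
  simp only [consFirst, List.replicate_zero, List.nil_append]
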